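-- pv_equiv track=rewrite | github.com/SeongcheolJeong/Autonomy-E2E-Codebase | 30_Projects/P_Sim-Engine/prototype/sensor_sim_bridge.py | _count_modality_frames
-- ===== SOURCE A (Python) =====
-- from typing import Any
--
-- def _count_modality_frames(frames: list[dict[str, Any]]) -> dict[str, int]:
--     counts: dict[str, int] = {}
--     for frame in frames:
--         if not isinstance(frame, dict):
--             continue
--         sensor_type = str(frame.get("sensor_type", "")).strip().lower()
--         if not sensor_type:
--             continue
--         counts[sensor_type] = counts.get(sensor_type, 0) + 1
--     return {key: counts[key] for key in sorted(counts.keys())}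
-- ===== SOURCE B (Python) =====
-- def _count_modality_frames(frames):
--     # Sort-then-group: collect normalized sensor types, sort them, then
--     # run-length scan consecutive runs; result is already in sorted key order.
--     keys = []
--     for frame in frames:
--         if not isinstance(frame, dict):
--             continue
--         k = str(frame.get("sensor_type", "")).strip().lower()
--         if k:
--             keys.append(k)
--     keys.sort()
--     result = {}
--     i = 0
--     n = len(keys)
--     while i < n:
--         j = i + 1
--         while j < n and keys[j] == keys[i]:
--             j += 1
--         result[keys[i]] = j - i
--         i = j
--     return result
-- ===== Notes on version B (the rewrite author's own statement) =====
-- stated objective: alternative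
-- what changed: A builds a hash-map counter while scanning frames and then sorts its keys; B collects the normalized sensor-type strings, sorts them once, and produces the counts by a run-length scan over the sorted list, so no counter dict and no separate key-sort exist.
import Mathlib
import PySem

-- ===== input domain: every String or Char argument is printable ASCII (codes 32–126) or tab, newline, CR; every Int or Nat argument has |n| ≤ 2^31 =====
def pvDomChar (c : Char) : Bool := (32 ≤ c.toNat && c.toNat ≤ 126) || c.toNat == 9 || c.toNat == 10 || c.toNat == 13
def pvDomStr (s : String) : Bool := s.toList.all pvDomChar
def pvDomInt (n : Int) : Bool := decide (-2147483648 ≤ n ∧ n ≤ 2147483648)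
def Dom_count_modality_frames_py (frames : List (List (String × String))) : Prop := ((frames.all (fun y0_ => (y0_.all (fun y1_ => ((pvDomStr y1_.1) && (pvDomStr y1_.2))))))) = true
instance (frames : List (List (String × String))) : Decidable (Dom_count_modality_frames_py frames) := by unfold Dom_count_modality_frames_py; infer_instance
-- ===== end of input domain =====

-- B replaces A's hash-count-then-sort-keys with sort-then-run-length-group (alternative algorithm, same result).

-- shared by both ports: str(frame.get("sensor_type", "")).strip().lower()
-- (values are strings here, so str() is the identity; frame lookup is first-match on the association list)
def pvSensorKey (frame : List (String × String)) : String :=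
  PySem.Str.lower (PySem.Str.strip ((PySem.Dict.mk frame).getD "sensor_type" ""))

-- ===== PORT A =====
def count_modality_frames_py (frames : List (List (String × String))) : List (String × Int) :=
  let counts : PySem.Dict String Int :=
    frames.foldl (fun counts frame =>
      let sensor_type := pvSensorKey frame
      if sensor_type = "" then counts
      else counts.insert sensor_type (counts.getD sensor_type 0 + 1)) PySem.Dict.empty
  -- {key: counts[key] for key in sorted(counts.keys())}: every key is present, so counts[key] is exactly counts.getD key 0
  (PySem.List.sorted counts.keys id).map (fun key => (key, counts.getD key 0))

-- ===== PORT B =====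
-- the two nested while loops of Source B: one run per outer step; the run length j - i is takeWhile-length + 1
def pvRunLengths : List String → List (String × Int)
  | [] => []
  | k :: t =>
      (k, ((t.takeWhile (· == k)).length + 1 : Int)) :: pvRunLengths (t.dropWhile (· == k))
  termination_by l => l.length
  decreasing_by simpa using Nat.lt_succ_of_le (List.length_dropWhile_le _ _)

def count_modality_frames_py_alt (frames : List (List (String × String))) : List (String × Int) :=
  let keys := PySem.List.sorted ((frames.map pvSensorKey).filter (fun k => k ≠ "")) id
  pvRunLengths keys

-- ===== PRECONDITION & SPEC =====
def Spec_count_modality_frames_py (frames : List (List (String × String))) (out : List (String × Int)) : Prop := out = count_modality_frames_py_alt frames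
instance (frames : List (List (String × String))) (out : List (String × Int)) : Decidable (Spec_count_modality_frames_py frames out) := by unfold Spec_count_modality_frames_py; infer_instance

-- ===== CLAIM (what is proved, stated in full; the proofs are below) =====
def Claim_equal_count_modality_frames_py : Prop := ∀ (frames : List (List (String × String))), Dom_count_modality_frames_py frames → Spec_count_modality_frames_py frames (count_modality_frames_py frames)

-- ===== LEMMAS AND PROOFS =====

-- A's counting loop is Counter of the filtered, normalized key list
lemma counts_eq_counter (frames : List (List (String × String))) :
    frames.foldl (fun counts frame =>
      let sensor_type := pvSensorKey frame
      if sensor_type = "" then counts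
      else counts.insert sensor_type (counts.getD sensor_type 0 + 1)) PySem.Dict.empty
    = PySem.Dict.counter ((frames.map pvSensorKey).filter (fun k => k ≠ "")) := by
  rw [← PySem.Dict.foldl_insert_getD_add_one_eq_counter, List.foldl_filter, List.foldl_map]
  have hfun : (fun (d : PySem.Dict String Int) fr =>
        let sensor_type := pvSensorKey fr
        if sensor_type = "" then d
        else d.insert sensor_type (d.getD sensor_type 0 + 1))
      = (fun (d : PySem.Dict String Int) fr =>
          if ((fun k => k ≠ "") (pvSensorKey fr) : Bool) = true
          then d.insert (pvSensorKey fr) (d.getD (pvSensorKey fr) 0 + 1) else d) := by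
    funext d fr
    by_cases h : pvSensorKey fr = "" <;> simp [h]
  rw [hfun]

-- run-length scan of a ≤-sorted list: strictly increasing keys, same membership as the list, counts
lemma rle_spec (s : List String) (hs : s.Pairwise (· ≤ ·)) :
    ((pvRunLengths s).map Prod.fst).Pairwise (· < ·)
    ∧ (∀ x, x ∈ (pvRunLengths s).map Prod.fst ↔ x ∈ s)
    ∧ (∀ p ∈ pvRunLengths s, p.2 = (s.count p.1 : Int)) := by
  induction s using pvRunLengths.induct with
  | case1 => simp [pvRunLengths]
  | case2 k t ih =>
    rw [List.pairwise_cons] at hs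
    obtain ⟨hk_le, ht⟩ := hs
    have ht1k : ∀ x ∈ t.takeWhile (· == k), x = k := by
      intro x hx; simpa using List.mem_takeWhile_imp hx
    have ht2pw : (t.dropWhile (· == k)).Pairwise (· ≤ ·) :=
      ht.sublist (List.dropWhile_sublist _)
    have hsplit : t.takeWhile (· == k) ++ t.dropWhile (· == k) = t :=
      List.takeWhile_append_dropWhile
    have hknot : k ∉ t.dropWhile (· == k) := by
      intro hk2
      obtain ⟨h₂, r, hdw⟩ : ∃ h₂ r, t.dropWhile (· == k) = h₂ :: r := by
        rcases hdw : t.dropWhile (· == k) with _ | ⟨h₂, r⟩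
        · rw [hdw] at hk2; simp at hk2
        · exact ⟨h₂, r, rfl⟩
      have hne2 : h₂ ≠ k := by
        have h := List.head_dropWhile_not (p := (· == k)) (l := t) (by rw [hdw]; simp)
        have h2 : (t.dropWhile (· == k)).head (by rw [hdw]; simp) = h₂ := by simp [hdw]
        rw [h2] at h
        simpa using h
      have hmemh : h₂ ∈ t := (List.dropWhile_sublist _).subset (by rw [hdw]; simp)
      have h1 : k ≤ h₂ := hk_le _ hmemh
      rw [hdw] at hk2 ht2pw
      rcases List.mem_cons.mp hk2 with h | h
      · exact hne2 h.symm
      · exact hne2 (le_antisymm (List.rel_of_pairwise_cons ht2pw h) h1)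
    obtain ⟨ihpw, ihmem, ihcnt⟩ := ih ht2pw
    have hmem2 : ∀ x ∈ t.dropWhile (· == k), x ≠ k := by
      intro x hx hxk; exact hknot (hxk ▸ hx)
    have hcnt1 : ∀ x, x ≠ k → (t.takeWhile (· == k)).count x = 0 := by
      intro x hx
      exact List.count_eq_zero.mpr (fun hmem => hx (ht1k _ hmem))
    have hcountt : ∀ x, t.count x =
        (t.takeWhile (· == k)).count x + (t.dropWhile (· == k)).count x := by
      intro x
      conv_lhs => rw [← hsplit]
      rw [List.count_append]
    refine ⟨?_, ?_, ?_⟩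
    · rw [pvRunLengths]
      simp only [List.map_cons, List.pairwise_cons]
      refine ⟨?_, ihpw⟩
      intro x hx
      have hxt2 : x ∈ t.dropWhile (· == k) := (ihmem x).mp hx
      have hxt : x ∈ t := (List.dropWhile_sublist _).subset hxt2
      exact lt_of_le_of_ne (hk_le _ hxt) (Ne.symm (hmem2 _ hxt2))
    · intro x
      rw [pvRunLengths]
      simp only [List.map_cons, List.mem_cons, ihmem]
      constructor
      · rintro (rfl | h)
        · exact Or.inl rfl
        · exact Or.inr ((List.dropWhile_sublist _).subset h)
      · rintro (rfl | h)
        · exact Or.inl rfl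
        · rw [← hsplit] at h
          rcases List.mem_append.mp h with h | h
          · exact Or.inl (ht1k _ h)
          · exact Or.inr h
    · intro p hp
      rw [pvRunLengths] at hp
      rcases List.mem_cons.mp hp with rfl | hp
      · have h1 : (t.takeWhile (· == k)).count k = (t.takeWhile (· == k)).length :=
          List.count_eq_length.mpr (fun b hb => ((ht1k _ hb).symm ▸ rfl))
        have h2 : (t.dropWhile (· == k)).count k = 0 := List.count_eq_zero.mpr hknot
        simp only [List.count_cons_self, hcountt, h1, h2]
        push_cast
        ring
      · have hkey : p.1 ∈ t.dropWhile (· == k) := by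
          have : p.1 ∈ (pvRunLengths (t.dropWhile (· == k))).map Prod.fst :=
            List.mem_map.mpr ⟨p, hp, rfl⟩
          exact (ihmem _).mp this
        have hne : p.1 ≠ k := hmem2 _ hkey
        rw [ihcnt p hp]
        congr 1
        rw [List.count_cons_of_ne (Ne.symm hne), hcountt, hcnt1 _ hne, Nat.zero_add]

-- ===== VERDICT (by name: the statement is the Claim_ definition above) =====
theorem count_modality_frames_py_spec : Claim_equal_count_modality_frames_py := by
  intro frames _hdom
  unfold Spec_count_modality_frames_py
  simp only [count_modality_frames_py, count_modality_frames_py_alt, counts_eq_counter]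
  obtain ⟨hpw, hmem, hcnt⟩ :=
    rle_spec (PySem.List.sorted ((frames.map pvSensorKey).filter (fun k => k ≠ "")) id)
      (by simpa using
        PySem.List.sorted_pairwise ((frames.map pvSensorKey).filter (fun k => k ≠ "")) id)
  have hKnd : ((pvRunLengths (PySem.List.sorted ((frames.map pvSensorKey).filter (fun k => k ≠ "")) id)).map Prod.fst).Nodup :=
    hpw.imp ne_of_lt
  have hKperm : ((pvRunLengths (PySem.List.sorted ((frames.map pvSensorKey).filter (fun k => k ≠ "")) id)).map Prod.fst).Perm
      (PySem.Set.ofList ((frames.map pvSensorKey).filter (fun k => k ≠ ""))) := by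
    refine (List.perm_ext_iff_of_nodup hKnd (PySem.Set.nodup_ofList _)).mpr ?_
    intro x
    rw [hmem, PySem.List.mem_sorted, PySem.Set.mem_ofList]
  have hkeys : PySem.List.sorted (PySem.Set.ofList ((frames.map pvSensorKey).filter (fun k => k ≠ ""))) id
      = (pvRunLengths (PySem.List.sorted ((frames.map pvSensorKey).filter (fun k => k ≠ "")) id)).map Prod.fst :=
    PySem.List.sorted_eq_of_perm_of_pairwise_lt _ _ id hKperm (by simpa using hpw)
  rw [PySem.Dict.keys_counter, hkeys, List.map_map]
  conv_rhs => rw [← List.map_id (pvRunLengths (PySem.List.sorted ((frames.map pvSensorKey).filter (fun k => k ≠ "")) id))]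
  apply List.map_congr_left
  intro p hp
  have hcount_s : (PySem.List.sorted ((frames.map pvSensorKey).filter (fun k => k ≠ "")) id).count p.1
      = ((frames.map pvSensorKey).filter (fun k => k ≠ "")).count p.1 :=
    (PySem.List.sorted_perm _ id false).count_eq p.1
  simp only [Function.comp, PySem.Dict.getD_counter, id]
  rw [← hcount_s, ← hcnt p hp]
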